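-- pv_equiv track=rewrite | github.com/jakebolewski/hashdist | hashdist/cli/frontend_cli.py | system_lib
-- ===== SOURCE A (Python) =====
-- def system_lib(name):
--     if name == "":
--         return True
--     system_libs = [
--             # linux
--             "linux-vdso",
--             "linux-gate",
--
--             # libc
--             "libc",
--             "libm",
--             "libutil",
--             "libcrypt",
--             "libpthread",
--             "libdl",
--             "librt",
--             "libnsl",
--
--             # gcc
--             "libstdc++",
--             "libgfortran",
--             "libquadmath",
--             "libgcc_s",
--
--             # X11
--             "libX11",
--             "libXau",
--             "libXext",
--             "libxcb",
--             "libXdmcp",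
--             ]
--
--     for lib in system_libs:
--         if name.startswith(lib + ".so"):
--             return True
--     return False
-- ===== SOURCE B (Python) =====
-- _SYSTEM_LIBS = frozenset([
--     "linux-vdso", "linux-gate",
--     "libc", "libm", "libutil", "libcrypt", "libpthread",
--     "libdl", "librt", "libnsl",
--     "libstdc++", "libgfortran", "libquadmath", "libgcc_s",
--     "libX11", "libXau", "libXext", "libxcb", "libXdmcp",
-- ])
--
-- def system_lib(name):
--     if name == "":
--         return True
--     i = name.find(".so")
--     return i != -1 and name[:i] in _SYSTEM_LIBS
-- ===== Notes on version B (the rewrite author's own statement) =====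
-- stated objective: simpler
-- what changed: Replaces the linear startswith-scan over the 19 prefixes by computing the part of the name before its first '.so' with one find and doing a single frozenset membership lookup (valid because no prefix can contain an earlier '.so' occurrence).
import Mathlib
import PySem

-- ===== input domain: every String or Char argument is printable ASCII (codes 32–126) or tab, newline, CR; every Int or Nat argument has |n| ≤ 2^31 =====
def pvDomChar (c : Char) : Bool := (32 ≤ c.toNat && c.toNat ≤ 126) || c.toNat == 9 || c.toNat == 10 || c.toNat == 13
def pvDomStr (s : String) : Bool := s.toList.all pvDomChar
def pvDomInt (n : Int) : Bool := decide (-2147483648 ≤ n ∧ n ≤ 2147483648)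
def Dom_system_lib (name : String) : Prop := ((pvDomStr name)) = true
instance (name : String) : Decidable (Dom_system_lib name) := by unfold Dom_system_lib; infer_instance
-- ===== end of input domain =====

-- B replaces A's linear startswith-scan over the prefix list by one '.so'-find plus a single
-- set-membership lookup of the part of the name before the first '.so' (objective: simpler).

-- ===== PORT A =====
def pvLibsA : List String :=
  ["linux-vdso", "linux-gate",
   "libc", "libm", "libutil", "libcrypt", "libpthread", "libdl", "librt", "libnsl",
   "libstdc++", "libgfortran", "libquadmath", "libgcc_s",
   "libX11", "libXau", "libXext", "libxcb", "libXdmcp"]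

-- the for-loop with early 'return True'
def pvLoopA (name : String) : List String → Bool
  | [] => false
  | lib :: rest =>
      if PySem.Str.startswith name (lib ++ ".so") then true else pvLoopA name rest

def system_lib (name : String) : Bool :=
  if name = "" then true else pvLoopA name pvLibsA

-- ===== PORT B =====
-- the frozenset of prefixes (elements as List Char, the ports' string payload)
def pvLibsBList : List (List Char) :=
  ["linux-vdso".toList, "linux-gate".toList,
   "libc".toList, "libm".toList, "libutil".toList, "libcrypt".toList, "libpthread".toList,
   "libdl".toList, "librt".toList, "libnsl".toList,
   "libstdc++".toList, "libgfortran".toList, "libquadmath".toList, "libgcc_s".toList,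
   "libX11".toList, "libXau".toList, "libXext".toList, "libxcb".toList, "libXdmcp".toList]

def pvLibsB : PySem.Set (List Char) := PySem.Set.ofList pvLibsBList

def system_lib_alt (name : String) : Bool :=
  if name = "" then true
  else
    let i := PySem.Str.find name ".so"                      -- i = name.find(".so")
    (i != -1) && PySem.Set.contains pvLibsB (PySem.List.slice name.toList none (some i))
                                                            -- i != -1 and name[:i] in _SYSTEM_LIBS

-- ===== PRECONDITION & SPEC =====
def Spec_system_lib (name : String) (out : Bool) : Prop := out = system_lib_alt name
instance (name : String) (out : Bool) : Decidable (Spec_system_lib name out) := by unfold Spec_system_lib; infer_instance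

-- ===== CLAIM (what is proved, stated in full; the proofs are below) =====
def Claim_equal_system_lib : Prop := ∀ (name : String), Dom_system_lib name → Spec_system_lib name (system_lib name)

-- ===== LEMMAS AND PROOFS =====

-- A's early-return loop is an existential scan
theorem pvLoopA_eq_true_iff (name : String) (L : List String) :
    pvLoopA name L = true ↔ ∃ lib ∈ L, PySem.Str.startswith name (lib ++ ".so") = true := by
  induction L with
  | nil => simp [pvLoopA]
  | cons lib rest ih =>
      unfold pvLoopA
      split_ifs with h
      · exact ⟨fun _ => ⟨lib, List.mem_cons_self .., h⟩, fun _ => rfl⟩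
      · rw [ih]
        constructor
        · rintro ⟨l, hm, hl⟩; exact ⟨l, List.mem_cons_of_mem _ hm, hl⟩
        · rintro ⟨l, hm, hl⟩
          rcases List.mem_cons.mp hm with rfl | hm'
          · exact absurd hl h
          · exact ⟨l, hm', hl⟩

-- a suffix stays a suffix after appending on the right
theorem pv_suffix_append (a b t : List Char) (h : a <:+ b) : a ++ t <:+ b ++ t := by
  obtain ⟨w, hw⟩ := h
  exact ⟨w, by rw [← hw, List.append_assoc]⟩

-- none of the prefixes can host an earlier '.so' occurrence (no '.so' inside lib ++ ".s")
theorem pv_no_early_so : ∀ l ∈ pvLibsBList, ¬ (['.','s','o'] <:+: (l ++ ['.','s'])) := by decide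

-- the core characterisation: when '.so' cannot occur early, "name startswith lib + '.so'"
-- is exactly "the FIRST '.so' is at position lib.length and the part before it is lib"
theorem pv_start_iff (s l : List Char) (h : ¬ (['.','s','o'] <:+: (l ++ ['.','s']))) :
    PySem.Chars.startswith s (l ++ ['.','s','o']) = true ↔
      (PySem.Chars.find s ['.','s','o'] = (l.length : Int) ∧ s.take l.length = l) := by
  constructor
  · intro hs
    rw [PySem.Chars.startswith_iff] at hs
    obtain ⟨t, ht⟩ := hs
    subst ht
    have hinf : ['.','s','o'] <:+: l ++ ['.','s','o'] ++ t :=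
      ⟨l, t, by simp⟩
    have hnn : 0 ≤ PySem.Chars.find (l ++ ['.','s','o'] ++ t) ['.','s','o'] :=
      (PySem.Chars.find_nonneg_iff _ _).mpr hinf
    obtain ⟨hpref, hmin⟩ := PySem.Chars.find_spec hnn
    set k := (PySem.Chars.find (l ++ ['.','s','o'] ++ t) ['.','s','o']).toNat with hk
    have hdropl : (l ++ ['.','s','o'] ++ t).drop l.length = ['.','s','o'] ++ t := by
      rw [List.append_assoc, List.drop_append_of_le_length (le_refl _)]
      simp
    have hle : k ≤ l.length := by
      by_contra hgt
      push Not at hgt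
      exact hmin l.length hgt (hdropl ▸ List.prefix_append _ t)
    have hkeq : k = l.length := by
      rcases Nat.lt_or_ge k l.length with hlt | hge
      · exfalso
        -- an occurrence before l.length would put '.so' inside l ++ ".s"
        have hdropk : (l ++ ['.','s','o'] ++ t).drop k
            = (l.drop k ++ ['.','s']) ++ ('o' :: t) := by
          rw [List.append_assoc, List.drop_append_of_le_length (Nat.le_of_lt hlt)]
          simp
        rw [hdropk] at hpref
        have hlen : (['.','s','o'] : List Char).length ≤ (l.drop k ++ ['.','s']).length := by
          simp [List.length_drop]
          omega
        have hpu : ['.','s','o'] <+: (l.drop k ++ ['.','s']) :=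
          (List.isPrefix_append_of_length hlen).mp hpref
        have hsu : (l.drop k ++ ['.','s']) <:+ (l ++ ['.','s']) :=
          pv_suffix_append _ _ _ (List.drop_suffix k l)
        exact h (hpu.isInfix.trans hsu.isInfix)
      · omega
    refine ⟨?_, ?_⟩
    · rw [← Int.toNat_of_nonneg hnn, ← hk, hkeq]
    · rw [List.append_assoc, List.take_append_of_le_length (le_refl _), List.take_length]
  · rintro ⟨hfind, htake⟩
    have hnn : 0 ≤ PySem.Chars.find s ['.','s','o'] := by
      rw [hfind]; exact Int.natCast_nonneg _
    obtain ⟨hpref, -⟩ := PySem.Chars.find_spec hnn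
    rw [hfind, Int.toNat_natCast] at hpref
    obtain ⟨t, ht⟩ := hpref
    rw [PySem.Chars.startswith_iff]
    refine ⟨t, ?_⟩
    calc (l ++ ['.','s','o']) ++ t = l ++ (['.','s','o'] ++ t) := by simp
    _ = s.take l.length ++ s.drop l.length := by rw [htake, ht]
    _ = s := List.take_append_drop _ _

-- bridge: the A-side String list maps onto the B-side char-list set elements
theorem pv_lists_agree : pvLibsA.map String.toList = pvLibsBList := by decide

theorem system_lib_spec_aux (name : String) :
    system_lib name = system_lib_alt name := by
  by_cases h0 : name = ""
  · simp [system_lib, system_lib_alt, h0]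
  · unfold system_lib system_lib_alt
    rw [if_neg h0, if_neg h0]
    rw [Bool.eq_iff_iff]
    rw [pvLoopA_eq_true_iff]
    set s := name.toList with hs
    have hsol : (".so" : String).toList = ['.','s','o'] := by decide
    constructor
    · rintro ⟨lib, hmem, hstart⟩
      have hlmem : lib.toList ∈ pvLibsBList := by
        rw [← pv_lists_agree]; exact List.mem_map_of_mem hmem
      rw [PySem.Str.startswith_eq, String.toList_append, hsol] at hstart
      obtain ⟨hfind, htake⟩ := (pv_start_iff s lib.toList (pv_no_early_so _ hlmem)).mp hstart
      simp only [PySem.Str.find_eq, hsol, ← hs]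
      rw [hfind]
      have h1 : ((lib.toList.length : Int) != -1) = true := by simp
      rw [h1, Bool.true_and]
      rw [PySem.List.slice_to s (Int.natCast_nonneg _)]
      rw [Int.toNat_natCast, htake]
      rw [PySem.Set.contains_iff]
      unfold pvLibsB
      exact (PySem.Set.mem_ofList _ _).mpr hlmem
    · intro hB
      simp only [PySem.Str.find_eq, hsol, ← hs, Bool.and_eq_true, bne_iff_ne] at hB
      obtain ⟨hne, hmem⟩ := hB
      have hnn : 0 ≤ PySem.Chars.find s ['.','s','o'] := by
        have := PySem.Chars.neg_one_le_find (s := s) (sub := ['.','s','o'])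
        omega
      rw [PySem.List.slice_to s hnn, PySem.Set.contains_iff] at hmem
      have hmem' : s.take (PySem.Chars.find s ['.','s','o']).toNat ∈ pvLibsBList := by
        unfold pvLibsB at hmem
        exact (PySem.Set.mem_ofList _ _).mp hmem
      set k := (PySem.Chars.find s ['.','s','o']).toNat with hk
      set l := s.take k with hl
      -- the found occurrence lies within s, so the key has full length k
      obtain ⟨hpref, -⟩ := PySem.Chars.find_spec hnn
      have hklen : k ≤ s.length := by
        have h3 := hpref.length_le
        simp [List.length_drop] at h3
        omega
      have hllen : l.length = k := by
        rw [hl, List.length_take]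
        omega
      obtain ⟨lib, hmemA, hlibeq⟩ : ∃ lib ∈ pvLibsA, lib.toList = l := by
        have : l ∈ pvLibsA.map String.toList := pv_lists_agree ▸ hmem'
        simpa using this
      refine ⟨lib, hmemA, ?_⟩
      rw [PySem.Str.startswith_eq, String.toList_append, hsol, hlibeq, ← hs]
      apply (pv_start_iff s l (pv_no_early_so _ (hlibeq ▸ hmem'))).mpr
      refine ⟨?_, ?_⟩
      · rw [hllen, hk, Int.toNat_of_nonneg hnn]
      · rw [hllen, ← hl]

-- ===== VERDICT (by name: the statement is the Claim_ definition above) =====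
theorem system_lib_spec : Claim_equal_system_lib := by
  intro name _
  unfold Spec_system_lib
  exact system_lib_spec_aux name
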